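-- pv_equiv track=rewrite | github.com/Pavi2704/leetcode-problems | 1128-number-of-equivalent-domino-pairs/1128-number-of-equivalent-domino-pairs.py | numEquivDominoPairs
-- ===== SOURCE A (Python) =====
-- from typing import List
--
-- def numEquivDominoPairs(dominoes: List[List[int]]) -> int:
--     a = {}
--     count = 0
--     for d in dominoes:
--         key = tuple(sorted(d))
--         if key in a:
--             count += a[key]
--             a[key] += 1
--         else:
--             a[key] = 1
--     return count
-- ===== SOURCE B (Python) =====
-- from typing import List
--
-- def numEquivDominoPairs(dominoes: List[List[int]]) -> int:
--     # sort-then-scan: normalize each domino, sort all keys so equal ones are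
--     # adjacent, then add C(run, 2) for each maximal run of equal keys
--     keys = sorted(sorted(d) for d in dominoes)
--     total = 0
--     run = 0
--     prev = None
--     for k in keys:
--         if k == prev:
--             run += 1
--         else:
--             total += run * (run - 1) // 2
--             run = 1
--             prev = k
--     return run * (run - 1) // 2 + total
-- ===== Notes on version B (the rewrite author's own statement) =====
-- stated objective: alternative
-- what changed: B replaces A's hash-map pair accumulation by sort-then-scan: it sorts the normalized keys so equivalent dominoes become adjacent and sums the closed-form C(run,2) over maximal runs of equal keys, using no dictionary at all.
import Mathlib
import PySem

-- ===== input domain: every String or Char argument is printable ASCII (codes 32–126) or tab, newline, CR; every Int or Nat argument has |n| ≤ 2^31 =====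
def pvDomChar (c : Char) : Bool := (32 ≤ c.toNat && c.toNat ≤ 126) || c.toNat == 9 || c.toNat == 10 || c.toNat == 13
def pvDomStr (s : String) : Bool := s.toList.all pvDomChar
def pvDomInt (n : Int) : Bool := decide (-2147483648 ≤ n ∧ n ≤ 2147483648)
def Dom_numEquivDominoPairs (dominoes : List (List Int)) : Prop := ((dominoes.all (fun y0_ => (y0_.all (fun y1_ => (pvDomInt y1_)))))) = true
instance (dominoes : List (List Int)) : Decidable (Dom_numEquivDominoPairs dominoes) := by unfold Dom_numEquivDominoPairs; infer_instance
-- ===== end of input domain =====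

-- B replaces A's hash-map pair accumulation by sort-then-scan over runs of equal keys; objective: alternative.

-- ===== PORT A =====
-- literal port of A's loop state (a, count); 'a[key]' is read under the 'key in a' guard, so getD key 0 is exact there
def numEquivDominoPairs (dominoes : List (List Int)) : Int :=
  (dominoes.foldl
    (fun (st : PySem.Dict (List Int) Int × Int) d =>
      let a := st.1
      let count := st.2
      let key := PySem.List.sorted d (fun x => x) false
      if a.contains key then
        (a.insert key (a.getD key 0 + 1), count + a.getD key 0)
      else
        (a.insert key 1, count))
    (PySem.Dict.empty, 0)).2

-- ===== PORT B =====
-- Source B's loop body over state (total, run, prev); prev is None before the first key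
def pvStepB (st : Int × Int × Option (List Int)) (k : List Int) : Int × Int × Option (List Int) :=
  if st.2.2 = some k then (st.1, st.2.1 + 1, st.2.2)
  else (st.1 + PySem.Int.floordiv (st.2.1 * (st.2.1 - 1)) 2, 1, some k)

-- sorted(keys): Python's lexicographic list order is List.Lex (· < ·), the order of List.instLinearOrder
def pvKeySort (ks : List (List Int)) : List (List Int) :=
  @PySem.List.sorted (List Int) (List Int) List.instLinearOrder.toLT LinearOrder.toDecidableLT
    ks (fun x => x) false

def numEquivDominoPairs_alt (dominoes : List (List Int)) : Int :=
  let keys := pvKeySort (dominoes.map (fun d => PySem.List.sorted d (fun x => x) false))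
  let st := keys.foldl pvStepB (0, 0, none)
  PySem.Int.floordiv (st.2.1 * (st.2.1 - 1)) 2 + st.1

-- ===== PRECONDITION & SPEC =====
def Spec_numEquivDominoPairs (dominoes : List (List Int)) (out : Int) : Prop := out = numEquivDominoPairs_alt dominoes
instance (dominoes : List (List Int)) (out : Int) : Decidable (Spec_numEquivDominoPairs dominoes out) := by unfold Spec_numEquivDominoPairs; infer_instance

-- ===== CLAIM (what is proved, stated in full; the proofs are below) =====
def Claim_equal_numEquivDominoPairs : Prop := ∀ (dominoes : List (List Int)), Dom_numEquivDominoPairs dominoes → Spec_numEquivDominoPairs dominoes (numEquivDominoPairs dominoes)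

-- ===== LEMMAS AND PROOFS =====

-- C(v,2) as both programs compute it
def pvC2 (v : Int) : Int := PySem.Int.floordiv (v * (v - 1)) 2

lemma pvC2_succ (v : Int) : pvC2 (v + 1) = pvC2 v + v := by
  unfold pvC2
  rw [PySem.Int.floordiv_eq_ediv_of_pos (by norm_num),
      PySem.Int.floordiv_eq_ediv_of_pos (by norm_num)]
  have h : (v + 1) * (v + 1 - 1) = v * (v - 1) + v * 2 := by ring
  rw [h, Int.add_mul_ediv_right _ _ (by norm_num)]

lemma pvC2_zero : pvC2 0 = 0 := by decide

-- the quantity both programs compute: number of unordered pairs of equal elements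
def pvPairs : List (List Int) → Int
  | [] => 0
  | x :: t => (t.count x : Int) + pvPairs t

lemma pvPairs_perm {p q : List (List Int)} (h : p.Perm q) : pvPairs p = pvPairs q := by
  induction h with
  | nil => rfl
  | cons x h ih => simp only [pvPairs, ih, h.count_eq]
  | swap x y l =>
      simp only [pvPairs, List.count_cons]
      by_cases hxy : x = y
      · subst hxy; ring
      · have h1 : (y == x) = false := by simp [Ne.symm hxy]
        have h2 : (x == y) = false := by simp [hxy]
        rw [h1, h2]
        push_cast
        ring
  | trans h1 h2 ih1 ih2 => exact ih1.trans ih2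

lemma pvPairs_append_singleton (p : List (List Int)) (k : List Int) :
    pvPairs (p ++ [k]) = pvPairs p + (p.count k : Int) := by
  induction p with
  | nil => simp [pvPairs]
  | cons x t ih =>
      simp only [List.cons_append, pvPairs, ih, List.count_append, List.count_cons,
        List.count_nil]
      by_cases hxk : x = k
      · subst hxk
        simp only [beq_self_eq_true, if_true]
        push_cast
        ring
      · have h1 : (k == x) = false := by simp [Ne.symm hxk]
        have h2 : (x == k) = false := by simp [hxk]
        rw [h1, h2]
        push_cast
        ring

-- A's loop step, over normalized keys
def pvStepA (st : PySem.Dict (List Int) Int × Int) (k : List Int) :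
    PySem.Dict (List Int) Int × Int :=
  if st.1.contains k then
    (st.1.insert k (st.1.getD k 0 + 1), st.2 + st.1.getD k 0)
  else
    (st.1.insert k 1, st.2)

-- A's loop invariant: the dict holds multiplicities, the counter holds the pair count
lemma pvA_inv (ks : List (List Int)) :
    (∀ k, (ks.foldl pvStepA (PySem.Dict.empty, 0)).1.getD k 0 = (ks.count k : Int)) ∧
    (∀ k, (ks.foldl pvStepA (PySem.Dict.empty, 0)).1.contains k = decide (k ∈ ks)) ∧
    (ks.foldl pvStepA (PySem.Dict.empty, 0)).2 = pvPairs ks := by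
  induction ks using List.reverseRecOn with
  | nil =>
      refine ⟨?_, ?_, rfl⟩ <;> intro k <;>
        simp [PySem.Dict.getD_empty, PySem.Dict.contains_empty]
  | append_singleton l x ih =>
      obtain ⟨ihD, ihC, ihP⟩ := ih
      rw [List.foldl_append]
      set st := l.foldl pvStepA (PySem.Dict.empty, 0) with hst
      simp only [List.foldl_cons, List.foldl_nil]
      cases hc : st.1.contains x with
      | true =>
        have hx : x ∈ l := by
          have := ihC x; rw [hc] at this; exact of_decide_eq_true this.symm
        refine ⟨?_, ?_, ?_⟩
        · intro k
          simp only [pvStepA, hc, if_true]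
          rw [PySem.Dict.getD_insert]
          by_cases hk : k = x
          · subst hk
            simp [ihD k, List.count_append]
          · have hxk : ¬ x = k := fun h => hk h.symm
            simp [hk, ihD k, List.count_append, hxk]
        · intro k
          simp only [pvStepA, hc, if_true]
          rw [PySem.Dict.contains_insert, ihC k]
          by_cases hk : k = x <;> simp [hk, List.mem_append]
        · simp only [pvStepA, hc, if_true]
          rw [ihP, ihD x, pvPairs_append_singleton]
      | false =>
        have hx : x ∉ l := by
          have := ihC x
          rw [hc] at this
          exact of_decide_eq_false this.symm
        have hcnt : l.count x = 0 := List.count_eq_zero.mpr hx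
        refine ⟨?_, ?_, ?_⟩
        · intro k
          simp only [pvStepA, hc, Bool.false_eq_true, if_false]
          rw [PySem.Dict.getD_insert]
          by_cases hk : k = x
          · subst hk; simp [List.count_append, hcnt]
          · have hxk : ¬ x = k := fun h => hk h.symm
            simp [hk, ihD k, List.count_append, hxk]
        · intro k
          simp only [pvStepA, hc, Bool.false_eq_true, if_false]
          rw [PySem.Dict.contains_insert, ihC k]
          by_cases hk : k = x <;> simp [hk, List.mem_append]
        · simp only [pvStepA, hc, Bool.false_eq_true, if_false]
          rw [ihP, pvPairs_append_singleton, hcnt]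
          simp

-- B's scan invariant: folding from mid-run state (total, run, some k) over a sorted tail
lemma pvB_scan (l : List (List Int)) (hpw : l.Pairwise (fun a b => a ≤ b)) :
    ∀ (total run : Int) (k : List Int), (∀ x ∈ l, k ≤ x) →
      pvC2 (l.foldl pvStepB (total, run, some k)).2.1 + (l.foldl pvStepB (total, run, some k)).1
        = total + pvC2 (run + (l.count k : Int)) - pvC2 ((l.count k : Int)) + pvPairs l := by
  induction l with
  | nil =>
      intro total run k _
      simp only [List.foldl_nil, List.count_nil, Nat.cast_zero, add_zero, pvC2_zero, pvPairs]
      ring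
  | cons x t ih =>
      intro total run k hlb
      have hpwt : t.Pairwise (fun a b => a ≤ b) := hpw.of_cons
      have hxt : ∀ y ∈ t, x ≤ y := fun y hy => (List.pairwise_cons.mp hpw).1 y hy
      by_cases hk : k = x
      · subst hk
        have hstep : pvStepB (total, run, some k) k = (total, run + 1, some k) := by
          simp [pvStepB]
        rw [List.foldl_cons, hstep, ih hpwt total (run + 1) k hxt]
        have hc : ((k :: t).count k : Int) = (t.count k : Int) + 1 := by
          simp
        rw [hc]
        have h1 : run + 1 + (t.count k : Int) = run + ((t.count k : Int) + 1) := by ring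
        rw [h1, pvC2_succ ((t.count k : Int))]
        simp only [pvPairs]
        ring
      · have hxk : ¬ x = k := fun h => hk h.symm
        have hstep : pvStepB (total, run, some k) x
            = (total + pvC2 run, 1, some x) := by
          simp only [pvStepB, pvC2]
          rw [if_neg (by simpa using hk)]
        rw [List.foldl_cons, hstep, ih hpwt (total + pvC2 run) 1 x hxt]
        have hklt : k < x := lt_of_le_of_ne (hlb x (List.mem_cons_self)) hk
        have hkt : t.count k = 0 := by
          rw [List.count_eq_zero]
          intro hmem
          exact absurd (hxt k hmem) (not_le.mpr hklt)
        have hcx : ((x :: t).count k : Int) = 0 := by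
          simp [hxk, hkt]
        rw [hcx]
        have h1 : (1 : Int) + (t.count x : Int) = (t.count x : Int) + 1 := by ring
        rw [h1, pvC2_succ ((t.count x : Int))]
        simp only [pvPairs, pvC2_zero]
        ring

-- B's whole scan from the initial (0, 0, None) state computes the pair count of a sorted list
lemma pvB_run (l : List (List Int)) (hpw : l.Pairwise (fun a b => a ≤ b)) :
    pvC2 (l.foldl pvStepB (0, 0, none)).2.1 + (l.foldl pvStepB (0, 0, none)).1 = pvPairs l := by
  cases l with
  | nil => simp [pvPairs, pvC2_zero]
  | cons x t =>
      have hstep : pvStepB (0, 0, none) x = (0 + pvC2 0, 1, some x) := by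
        simp [pvStepB, pvC2]
      rw [List.foldl_cons, hstep,
        pvB_scan t hpw.of_cons (0 + pvC2 0) 1 x
          (fun y hy => (List.pairwise_cons.mp hpw).1 y hy)]
      have h1 : (1 : Int) + (t.count x : Int) = (t.count x : Int) + 1 := by ring
      rw [h1, pvC2_succ ((t.count x : Int))]
      simp only [pvPairs, pvC2_zero]
      ring

lemma pvKeySort_pairwise (ks : List (List Int)) :
    (pvKeySort ks).Pairwise (fun a b => a ≤ b) :=
  PySem.List.sorted_pairwise (κ := List Int) ks (fun x => x)

lemma pvKeySort_perm (ks : List (List Int)) : (pvKeySort ks).Perm ks :=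
  @PySem.List.sorted_perm (List Int) (List Int) List.instLinearOrder.toLT LinearOrder.toDecidableLT
    ks (fun x => x) false

-- ===== VERDICT (by name: the statement is the Claim_ definition above) =====
theorem numEquivDominoPairs_spec : Claim_equal_numEquivDominoPairs := by
  intro dominoes _
  unfold Spec_numEquivDominoPairs
  have hA : numEquivDominoPairs dominoes
      = ((dominoes.map (fun d => PySem.List.sorted d (fun x => x) false)).foldl
          pvStepA (PySem.Dict.empty, 0)).2 := by
    unfold numEquivDominoPairs
    rw [List.foldl_map]
    rfl
  have hB : numEquivDominoPairs_alt dominoes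
      = pvPairs (pvKeySort (dominoes.map (fun d => PySem.List.sorted d (fun x => x) false))) :=
    pvB_run _ (pvKeySort_pairwise _)
  rw [hA, (pvA_inv _).2.2, hB]
  exact pvPairs_perm (pvKeySort_perm _).symm
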